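-- pv_equiv track=rewrite | github.com/afaust76/Chalice-Helper | fileobj.py | hyphenate
-- ===== SOURCE A (Python) =====
-- def hyphenate(numbers):
--     ranges = []
--     stack = []
--
--     if(len(numbers) == 1):
--         return str(numbers[0] + 1)
--
--     # Iterates through the indexes
--     for i in numbers:
--         # Adjusts the index to refer to the ID
--         i += 1
--         # If the stack is empty
--         if (len(stack) == 0):
--             stack.append(i)
--         # If the index is part of a continuous range
--         elif (i == stack[-1] + 1):
--             stack.append(i)
--         # If the index breaks the continuous range
--         else:
--             # If the broken range was only one value
--             if (len(stack) == 1):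
--                 ranges.append(str(stack[0]))
--             # If the broken range was multiple values
--             else:
--                 ranges.append(str(stack[0]) + "-" + str(stack[-1]))
--             # Starts a new range
--             stack = [i]
--
--     # If there are still values on the stack
--     if (len(stack) != 0):
--         # If the remaining range is only one value
--         if (len(stack) == 1):
--             ranges.append(str(stack[0]))
--         # If the remaining range is multiple values
--         else:
--             ranges.append(str(stack[0]) + "-" + str(stack[-1]))
--
--     return ",".join(ranges);
-- ===== SOURCE B (Python) =====
-- def hyphenate(numbers):
--     # Cut-position approach: compute the groupby-style key x-i, list the positions
--     # where the key changes, and format the slices between consecutive cuts.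
--     if not numbers:
--         return ""
--     n = len(numbers)
--     keys = [x - i for i, x in enumerate(numbers)]
--     cuts = [0] + [i for i in range(1, n) if keys[i] != keys[i - 1]] + [n]
--     parts = []
--     for lo, hi in zip(cuts, cuts[1:]):
--         first = numbers[lo] + 1
--         last = numbers[hi - 1] + 1
--         parts.append(str(first) if hi - lo == 1 else "%d-%d" % (first, last))
--     return ",".join(parts)
-- ===== Notes on version B (the rewrite author's own statement) =====
-- stated objective: alternative
-- what changed: Replaces A's single stateful pass (a stack of run members with in-loop emission and a post-loop flush) by a staged cut-position algorithm: compute the groupby-style keys x-i, list the positions where the key changes, and format the slice between each pair of consecutive cuts.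
import Mathlib
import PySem

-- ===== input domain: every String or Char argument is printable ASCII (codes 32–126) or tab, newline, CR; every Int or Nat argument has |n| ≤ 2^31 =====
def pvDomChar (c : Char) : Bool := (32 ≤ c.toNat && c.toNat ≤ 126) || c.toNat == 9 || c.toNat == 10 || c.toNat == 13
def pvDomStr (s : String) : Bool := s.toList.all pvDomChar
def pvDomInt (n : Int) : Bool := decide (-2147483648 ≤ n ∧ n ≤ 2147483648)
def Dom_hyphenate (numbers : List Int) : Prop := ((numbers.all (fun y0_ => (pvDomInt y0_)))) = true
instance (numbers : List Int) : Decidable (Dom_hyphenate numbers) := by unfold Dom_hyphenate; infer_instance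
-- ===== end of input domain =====

-- B replaces A's stack loop with in-loop emission by a staged cut-position algorithm:
-- it computes the groupby-style keys x-i, lists the positions where the key changes,
-- and formats the slice between each pair of consecutive cuts; same O(n) cost.


-- ===== PORT A =====
-- Loop body of A; stack[-1] / stack[0] are read only in branches where the stack is
-- nonempty, where getLast! / headI coincide with Python's negative/zero indexing.
def pvStepA (st : List String × List Int) (i0 : Int) : List String × List Int :=
  let i := i0 + 1
  if st.2.length == 0 then (st.1, st.2 ++ [i])
  else if i == st.2.getLast! + 1 then (st.1, st.2 ++ [i])
  else if st.2.length == 1 then (st.1 ++ [PySem.Int.toStr st.2.headI], [i])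
  else (st.1 ++ [PySem.Int.toStr st.2.headI ++ "-" ++ PySem.Int.toStr st.2.getLast!], [i])

-- A's post-loop flush of the remaining stack.
def pvFinalA (st : List String × List Int) : List String :=
  if st.2.length != 0 then
    (if st.2.length == 1 then st.1 ++ [PySem.Int.toStr st.2.headI]
     else st.1 ++ [PySem.Int.toStr st.2.headI ++ "-" ++ PySem.Int.toStr st.2.getLast!])
  else st.1

def hyphenate (numbers : List Int) : String :=
  -- numbers[0]: the guard guarantees length 1, so headI is Python's numbers[0].
  if numbers.length == 1 then PySem.Int.toStr (numbers.headI + 1)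
  else PySem.Str.join "," (pvFinalA (numbers.foldl pvStepA ([], [])))

-- ===== PORT B =====
-- numbers[i]: every index B uses (cut positions and their predecessors) is in range,
-- where pyGetD with any default is exactly Python's indexing.
def pvGetI (l : List Int) (i : Int) : Int := PySem.List.pyGetD l i 0

-- keys = [x - i for i, x in enumerate(numbers)]
def pvKeysB (numbers : List Int) : List Int :=
  (PySem.List.enumerate numbers).map (fun p => p.2 - p.1)

-- cuts = [0] + [i for i in range(1, n) if keys[i] != keys[i-1]] + [n]
def pvCutsB (numbers : List Int) : List Int :=
  0 :: ((PySem.List.pyRange 1 (numbers.length : Int) 1).filter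
          (fun i => !(pvGetI (pvKeysB numbers) i == pvGetI (pvKeysB numbers) (i - 1)))
        ++ [(numbers.length : Int)])

-- body of B's formatting loop for one (lo, hi) pair
def pvFmtSeg (numbers : List Int) (seg : Int × Int) : String :=
  let first := pvGetI numbers seg.1 + 1
  let last := pvGetI numbers (seg.2 - 1) + 1
  if seg.2 - seg.1 == 1 then PySem.Int.toStr first
  else PySem.Int.toStr first ++ "-" ++ PySem.Int.toStr last

def hyphenate_alt (numbers : List Int) : String :=
  if numbers.length == 0 then ""
  else
    let cuts := pvCutsB numbers
    PySem.Str.join ","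
      ((cuts.zip (PySem.List.slice cuts (some 1) none)).foldl
         (fun parts p => parts ++ [pvFmtSeg numbers p]) [])

-- ===== PRECONDITION & SPEC =====
def Spec_hyphenate (numbers : List Int) (out : String) : Prop := out = hyphenate_alt numbers
instance (numbers : List Int) (out : String) : Decidable (Spec_hyphenate numbers out) := by unfold Spec_hyphenate; infer_instance

-- ===== CLAIM (what is proved, stated in full; the proofs are below) =====
def Claim_equal_hyphenate : Prop := ∀ (numbers : List Int), Dom_hyphenate numbers → Spec_hyphenate numbers (hyphenate numbers)

-- ===== LEMMAS AND PROOFS =====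

-- Canonical run decomposition both proofs are related to: pvRunsRec builds the
-- maximal consecutive runs of the list right-to-left via pvConsMerge.
def pvConsMerge (r : Int × Int) (rs : List (Int × Int)) : List (Int × Int) :=
  match rs with
  | [] => [r]
  | (c, d) :: rest => if c == r.2 + 1 then (r.1, d) :: rest else r :: (c, d) :: rest

def pvRunsRec : List Int → List (Int × Int)
  | [] => []
  | x :: t => pvConsMerge (x, x) (pvRunsRec t)

def pvFmt : Int × Int → String := fun (a, b) =>
  if a == b then PySem.Int.toStr (a + 1)
  else PySem.Int.toStr (a + 1) ++ "-" ++ PySem.Int.toStr (b + 1)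

-- break positions of the suffix starting at absolute position p
def pvBrkN : Int → List Int → List Int
  | _, [] => []
  | _, [_] => []
  | p, x :: y :: t => (if y == x + 1 then [] else [p + 1]) ++ pvBrkN (p + 1) (y :: t)

def pvZipAdj (l : List Int) : List (Int × Int) := l.zip l.tail

-- a segment (lo,hi) of the list represents the run (a,b)
def pvRep (full : List Int) : Int × Int → Int × Int → Prop := fun seg run =>
  pvGetI full seg.1 = run.1 ∧ pvGetI full (seg.2 - 1) = run.2 ∧
  run.2 = run.1 + (seg.2 - seg.1 - 1) ∧ seg.1 < seg.2

lemma pv_headI_append {l t : List Int} (h : l ≠ []) : (l ++ t).headI = l.headI := by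
  cases l with
  | nil => exact absurd rfl h
  | cons a l' => rfl

lemma pv_join_singleton (s : String) : PySem.Str.join "," [s] = s := by
  apply String.toList_inj.mp
  simp [PySem.Str.toList_join, PySem.Chars.join_singleton]

lemma pv_consMerge_merge (a b : Int) (rs : List (Int × Int)) :
    pvConsMerge (a, b) (pvConsMerge (b + 1, b + 1) rs) = pvConsMerge (a, b + 1) rs := by
  rcases rs with _ | ⟨⟨c, d⟩, rest⟩
  · simp [pvConsMerge]
  · by_cases h : c = b + 1 + 1
    · simp [pvConsMerge, h]
    · simp [pvConsMerge, h]

lemma pv_runsRec_head (y : Int) (t : List Int) :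
    ∃ d r, pvRunsRec (y :: t) = (y, d) :: r := by
  simp only [pvRunsRec]
  rcases pvRunsRec t with _ | ⟨⟨c, d⟩, rest⟩
  · exact ⟨y, [], rfl⟩
  · by_cases h : c = y + 1
    · exact ⟨d, rest, by simp [pvConsMerge, h]⟩
    · exact ⟨y, (c, d) :: rest, by simp [pvConsMerge, h]⟩

-- A-side invariant: A's loop plus flush, started with the formatted completed runs
-- and a stack holding the current run a..b (shifted by +1), yields the formatting
-- of the canonical runs.
lemma pv_main (rest : List Int) : ∀ (completed : List (Int × Int)) (stack : List Int) (a b : Int),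
    stack ≠ [] → stack.headI = a + 1 → stack.getLast? = some (b + 1) →
    (stack.length = 1 ↔ a = b) → a ≤ b →
    pvFinalA (List.foldl pvStepA (completed.map pvFmt, stack) rest)
      = (completed ++ pvConsMerge (a, b) (pvRunsRec rest)).map pvFmt := by
  induction rest with
  | nil =>
    intro completed stack a b hne hh hl hlen hab
    simp only [List.foldl_nil, pvFinalA, pvRunsRec, pvConsMerge]
    have hstack : stack.length ≠ 0 := by simpa [List.length_eq_zero_iff] using hne
    by_cases h1 : stack.length = 1
    · have : a = b := hlen.mp h1
      subst this
      simp [h1, hh, pvFmt]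
    · have : ¬ (a = b) := fun h => h1 (hlen.mpr h)
      simp [hstack, h1, hh, hl, pvFmt, this]
  | cons x t ih =>
    intro completed stack a b hne hh hl hlen hab
    have hstack : ¬ (stack.length == 0) = true := by
      simpa [List.length_eq_zero_iff] using hne
    simp only [List.foldl_cons]
    by_cases hx : x = b + 1
    · -- the run continues
      have hstepA : pvStepA (completed.map pvFmt, stack) x = (completed.map pvFmt, stack ++ [x + 1]) := by
        simp [pvStepA, hstack, hl, hx]
      rw [hstepA]
      have hrec : pvRunsRec (x :: t) = pvConsMerge (b + 1, b + 1) (pvRunsRec t) := by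
        simp [pvRunsRec, hx]
      have := ih completed (stack ++ [x + 1]) a x
        (by simp) (by rw [pv_headI_append hne, hh]) (List.getLast?_concat ..)
        (by
          constructor
          · intro h
            exfalso
            have := List.length_pos_of_ne_nil hne
            simp only [List.length_append, List.length_cons, List.length_nil] at h
            omega
          · intro h; exfalso; omega)
        (by omega)
      rw [this, hrec, pv_consMerge_merge, hx]
    · -- the run breaks: A emits the finished run, the canonical head run is (a,b)
      obtain ⟨d, r, hr⟩ := pv_runsRec_head x t
      have hemit : pvStepA (completed.map pvFmt, stack) x
          = ((completed ++ [(a, b)]).map pvFmt, [x + 1]) := by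
        by_cases h1 : stack.length = 1
        · have hab' : a = b := hlen.mp h1
          simp [pvStepA, hl, hx, h1, hh, pvFmt, hab']
        · have hab' : ¬ (a = b) := fun h => h1 (hlen.mpr h)
          simp [pvStepA, hstack, hl, hx, h1, hh, pvFmt, hab']
      rw [hemit]
      have := ih (completed ++ [(a, b)]) [x + 1] x x (by simp) rfl rfl (by simp) le_rfl
      rw [this, hr]
      have h3 : pvConsMerge (x, x) (pvRunsRec t) = (x, d) :: r := by
        simpa [pvRunsRec] using hr
      rw [h3]
      simp [pvConsMerge, hx]

-- indexing into pre ++ suf at pre.length + j reads suf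
lemma pv_getI_append (pre suf : List Int) (j : Nat) :
    pvGetI (pre ++ suf) ((pre.length : Int) + j) = suf.getD j 0 := by
  have : ((pre.length : Int) + j) = ((pre.length + j : Nat) : Int) := by push_cast; ring
  rw [pvGetI, this, PySem.List.pyGetD_natCast]
  simp [List.getD, List.getElem?_append_right (Nat.le_add_right pre.length j)]

-- keys[L + j] = full[L + j] - (L + j)
lemma pv_keys_get (full : List Int) (j : Nat) (h : j < full.length) :
    pvGetI (pvKeysB full) (j : Int) = full.getD j 0 - j := by
  rw [pvGetI, PySem.List.pyGetD_natCast, pvKeysB]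
  have hj : j < (PySem.List.enumerate full 0).length := by
    simpa [PySem.List.length_enumerate] using h
  simp [List.getD, List.getElem?_map, List.getElem?_eq_getElem hj,
    List.getElem?_eq_getElem h, PySem.List.getElem_enumerate]

-- the filter over range(1, n) computes exactly the break positions
lemma pv_cuts (suf : List Int) : ∀ (pre : List Int),
    (PySem.List.pyRange ((pre.length : Int) + 1) ((pre.length : Int) + suf.length) 1).filter
      (fun i => !(pvGetI (pvKeysB (pre ++ suf)) i == pvGetI (pvKeysB (pre ++ suf)) (i - 1)))
    = pvBrkN (pre.length : Int) suf := by
  induction suf with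
  | nil =>
    intro pre
    rw [PySem.List.pyRange_one_eq_nil (by simp)]
    simp [pvBrkN]
  | cons x t ih =>
    intro pre
    rcases t with _ | ⟨y, t'⟩
    · rw [PySem.List.pyRange_one_eq_nil (by simp)]
      simp [pvBrkN]
    · have hcons : PySem.List.pyRange ((pre.length : Int) + 1) ((pre.length : Int) + (x :: y :: t').length) 1
          = ((pre.length : Int) + 1) :: PySem.List.pyRange ((pre.length : Int) + 1 + 1) ((pre.length : Int) + (x :: y :: t').length) 1 := by
        apply PySem.List.pyRange_one_cons
        simp only [List.length_cons]
        push_cast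
        omega
      rw [hcons]
      simp only [List.filter_cons]
      have hidx : ((pre.length : Int) + 1 - 1) = (pre.length : Int) := by ring
      rw [hidx]
      have hk1 : pvGetI (pvKeysB (pre ++ x :: y :: t')) (pre.length : Int) = x - pre.length := by
        rw [pv_keys_get _ pre.length (by simp)]
        have hget : (pre ++ x :: y :: t').getD pre.length 0 = x := by
          rw [List.getD_eq_getElem?_getD, List.getElem?_append_right (by omega)]
          simp
        rw [hget]
      have hk2 : pvGetI (pvKeysB (pre ++ x :: y :: t')) ((pre.length : Int) + 1)
          = y - ((pre.length : Int) + 1) := by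
        have h0 : ((pre.length : Int) + 1) = ((pre.length + 1 : Nat) : Int) := by push_cast; ring
        rw [h0, pv_keys_get _ (pre.length + 1) (by simp)]
        have hget : (pre ++ x :: y :: t').getD (pre.length + 1) 0 = y := by
          rw [List.getD_eq_getElem?_getD, List.getElem?_append_right (by omega)]
          simp
        rw [hget]
      have htail := ih (pre ++ [x])
      have hfix : ((pre ++ [x]).length : Int) = (pre.length : Int) + 1 := by simp
      rw [hfix, List.append_assoc] at htail
      simp only [List.cons_append, List.nil_append] at htail
      have hbd : ((pre.length : Int) + ((x :: y :: t').length : Int))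
          = (pre.length : Int) + 1 + (((y :: t').length : Nat) : Int) := by
        simp only [List.length_cons]; push_cast; ring
      rw [hbd, htail]
      by_cases hy : y = x + 1
      · have hcond : (!(pvGetI (pvKeysB (pre ++ x :: y :: t')) ((pre.length : Int) + 1)
            == pvGetI (pvKeysB (pre ++ x :: y :: t')) (pre.length : Int))) = false := by
          rw [hk1, hk2]
          simp only [Bool.not_eq_eq_eq_not, Bool.not_false, beq_iff_eq]
          omega
        rw [if_neg (by simp [hcond])]
        simp [pvBrkN, hy]
      · have hcond : (!(pvGetI (pvKeysB (pre ++ x :: y :: t')) ((pre.length : Int) + 1)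
            == pvGetI (pvKeysB (pre ++ x :: y :: t')) (pre.length : Int))) = true := by
          rw [hk1, hk2]
          simp only [Bool.not_eq_eq_eq_not, Bool.not_true, beq_eq_false_iff_ne, ne_eq]
          omega
        rw [if_pos hcond]
        simp [pvBrkN, hy]

-- the adjacent pairs of the cut list represent the canonical runs
lemma pv_rep (suf : List Int) : ∀ (pre : List Int), suf ≠ [] →
    List.Forall₂ (pvRep (pre ++ suf))
      (pvZipAdj ((pre.length : Int) :: (pvBrkN (pre.length : Int) suf ++ [((pre ++ suf).length : Int)])))
      (pvRunsRec suf) := by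
  induction suf with
  | nil => intro pre h; exact absurd rfl h
  | cons x t ih =>
    intro pre _
    rcases t with _ | ⟨y, t'⟩
    · -- single element: one segment (L, L+1) for the run (x, x)
      have hn : (((pre ++ [x]).length : Nat) : Int) = (pre.length : Int) + 1 := by simp
      simp only [pvBrkN, List.nil_append]
      rw [hn]
      have h0 := pv_getI_append pre [x] 0
      simp only [Nat.cast_zero, add_zero] at h0
      simp only [pvZipAdj, List.zip_cons_cons, List.tail_cons, List.zip_nil_right,
        pvRunsRec, pvConsMerge]
      refine List.Forall₂.cons ?_ List.Forall₂.nil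
      refine ⟨by simpa using h0, ?_, ?_, ?_⟩
      · show pvGetI (pre ++ [x]) ((pre.length : Int) + 1 - 1) = x
        have heq : ((pre.length : Int) + 1 - 1) = (pre.length : Int) := by ring
        rw [heq]
        simpa using h0
      · show x = x + ((pre.length : Int) + 1 - (pre.length : Int) - 1)
        ring
      · show (pre.length : Int) < (pre.length : Int) + 1
        omega
    · have hfull : (pre ++ [x]) ++ (y :: t') = pre ++ x :: y :: t' := by simp
      have htail := ih (pre ++ [x]) (by simp)
      rw [hfull] at htail
      have hfix : ((pre ++ [x]).length : Int) = (pre.length : Int) + 1 := by simp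
      rw [hfix] at htail
      obtain ⟨d, r, hr⟩ := pv_runsRec_head y t'
      rw [hr] at htail
      obtain ⟨c1, rest, hc⟩ : ∃ c1 rest,
          pvBrkN ((pre.length : Int) + 1) (y :: t') ++ [((pre ++ x :: y :: t').length : Int)] = c1 :: rest := by
        rcases h : pvBrkN ((pre.length : Int) + 1) (y :: t') with _ | ⟨c, cs⟩
        · exact ⟨((pre ++ x :: y :: t').length : Int), [], rfl⟩
        · exact ⟨c, cs ++ [((pre ++ x :: y :: t').length : Int)], rfl⟩
      rw [hc] at htail
      simp only [pvZipAdj, List.zip_cons_cons, List.tail_cons] at htail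
      rcases List.forall₂_cons.mp htail with ⟨hrep1, htail'⟩
      obtain ⟨hv1, hv2, hv3, hv4⟩ := hrep1
      have hgx := pv_getI_append pre (x :: y :: t') 0
      simp only [Nat.cast_zero, add_zero] at hgx
      by_cases hy : y = x + 1
      · -- key unchanged: the first segment extends left to L
        have hbrk : pvBrkN (pre.length : Int) (x :: y :: t') = pvBrkN ((pre.length : Int) + 1) (y :: t') := by
          simp [pvBrkN, hy]
        have hruns : pvRunsRec (x :: y :: t') = (x, d) :: r := by
          simp only [pvRunsRec] at hr ⊢
          rw [hr]
          simp [pvConsMerge, hy]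
        rw [hbrk, hruns, hc]
        simp only [pvZipAdj, List.zip_cons_cons, List.tail_cons]
        refine List.Forall₂.cons ?_ htail'
        refine ⟨by simpa using hgx, hv2, by simp only [] at hv3 ⊢; omega, by simp only [] at hv4 ⊢; omega⟩
      · -- key changes: a fresh singleton segment (L, L+1) for the run (x, x)
        have hbrk : pvBrkN (pre.length : Int) (x :: y :: t')
            = ((pre.length : Int) + 1) :: pvBrkN ((pre.length : Int) + 1) (y :: t') := by
          simp [pvBrkN, hy]
        have hruns : pvRunsRec (x :: y :: t') = (x, x) :: (y, d) :: r := by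
          simp only [pvRunsRec] at hr ⊢
          rw [hr]
          simp [pvConsMerge, hy]
        rw [hbrk, hruns, List.cons_append, hc]
        simp only [pvZipAdj, List.zip_cons_cons, List.tail_cons]
        refine List.Forall₂.cons ?_ (List.Forall₂.cons ⟨hv1, hv2, hv3, hv4⟩ htail')
        refine ⟨by simpa using hgx, ?_, by push_cast; ring, by push_cast; omega⟩
        have : ((pre.length : Int) + 1 - 1) = (pre.length : Int) := by ring
        rw [this]
        simpa using hgx

-- formatting a representing segment equals formatting its run
lemma pv_rep_map (full : List Int) :
    ∀ (segs : List (Int × Int)) (runs : List (Int × Int)),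
      List.Forall₂ (pvRep full) segs runs →
      segs.map (pvFmtSeg full) = runs.map pvFmt := by
  intro segs runs h
  induction h with
  | nil => rfl
  | @cons seg run segs' runs' hrep _ ih =>
    obtain ⟨lo, hi⟩ := seg
    obtain ⟨a, b⟩ := run
    obtain ⟨h1, h2, h3, h4⟩ := hrep
    simp only [] at h1 h2 h3 h4
    simp only [List.map_cons, ih]
    congr 1
    by_cases hd : hi - lo = 1
    · have hab : a = b := by omega
      simp [pvFmtSeg, pvFmt, hd, h1, hab]
    · have hab : ¬ (a = b) := by omega
      simp [pvFmtSeg, pvFmt, hd, h1, h2, hab]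

-- B computes the join of the formatted canonical runs
lemma pv_alt_char (numbers : List Int) (h : numbers ≠ []) :
    hyphenate_alt numbers = PySem.Str.join "," ((pvRunsRec numbers).map pvFmt) := by
  have hlen : ¬ (numbers.length == 0) = true := by
    simpa [List.length_eq_zero_iff] using h
  simp only [hyphenate_alt, hlen, if_neg, Bool.false_eq_true, not_false_eq_true]
  rw [PySem.List.slice_from_one, PySem.List.foldl_append_singleton_eq_map, List.nil_append]
  congr 1
  have hcuts : pvCutsB numbers
      = (0 : Int) :: (pvBrkN 0 numbers ++ [(numbers.length : Int)]) := by
    have := pv_cuts numbers []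
    simp only [List.length_nil, Nat.cast_zero, zero_add, List.nil_append] at this
    rw [pvCutsB, this]
  rw [hcuts]
  have hrep := pv_rep numbers [] h
  simp only [List.length_nil, Nat.cast_zero, List.nil_append] at hrep
  exact pv_rep_map numbers _ _ hrep

-- ===== VERDICT (by name: the statement is the Claim_ definition above) =====
theorem hyphenate_spec : Claim_equal_hyphenate := by
  intro numbers _
  unfold Spec_hyphenate
  match numbers with
  | [] => decide
  | [x] =>
    rw [pv_alt_char [x] (by simp)]
    simp [hyphenate, pvRunsRec, pvConsMerge, pvFmt, pv_join_singleton]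
  | x :: y :: t =>
    rw [pv_alt_char (x :: y :: t) (by simp)]
    simp only [hyphenate]
    rw [if_neg (by simp)]
    have hstep : List.foldl pvStepA ([], []) (x :: y :: t)
        = List.foldl pvStepA (([] : List (Int × Int)).map pvFmt, [x + 1]) (y :: t) := by
      rw [List.foldl_cons]; rfl
    rw [hstep, pv_main (y :: t) [] [x + 1] x x (by simp) rfl rfl (by simp) le_rfl]
    simp [pvRunsRec]
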